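-- pv_equiv track=rewrite | github.com/sushanthj/pretrained-backbones-unet | convert_coco_ann_to_ufld.py | get_middle_four
-- ===== SOURCE A (Python) =====
-- IMAGE_CENTER_X = 640
--
-- def get_middle_four(mid_point_list, index_list):
--     """
--     Args:
--              mid_point_list : sorted list of mid points of the polygons
--                  index_list : indexes of original list of polygons after sorting
--
--     Returns:
--         filtered_index_list : the final lane indexes to be selected
--     """
--     # filter the images based on whether the mid point is to left or right of image center
--     # and filter the index list as well
--     left_half_mid_points = []
--     right_half_mid_points = []
--     left_half_indexes = []
--     right_half_indexes = []
--
--     for i in range(len(mid_point_list)):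
--         if mid_point_list[i] < IMAGE_CENTER_X:
--             left_half_mid_points.append(mid_point_list[i])
--             left_half_indexes.append(index_list[i])
--
--     for i in range(len(mid_point_list)):
--         if mid_point_list[i] > IMAGE_CENTER_X:
--             right_half_mid_points.append(mid_point_list[i])
--             right_half_indexes.append(index_list[i])
--
--     # if there are no points on the left half, select the 4 points on the right half
--     if len(left_half_mid_points) == 0:
--         return right_half_indexes[:4]
--
--     # if there are no points on the right half, select the 4 points on the left half
--     if len(right_half_mid_points) == 0:
--         return left_half_indexes[-4:]
--
--     # if there is only 1 point on the left half, select the 3 points on the right half closest to the image center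
--     if len(left_half_mid_points) == 1:
--         return left_half_indexes + right_half_indexes[:3]
--
--     # if there is only 1 point on the right half, select the 3 points on the left half closest to the image center
--     if len(right_half_mid_points) == 1:
--         return left_half_indexes[-3:] + right_half_indexes
--
--     else:
--         # if there are points on both halves, select the 2 points on each half closest to the image center
--         # and return the indexes of those points
--         final_indexes = left_half_indexes[-2:] + right_half_indexes[:2]
--         return final_indexes
-- ===== SOURCE B (Python) =====
-- IMAGE_CENTER_X = 640
--
-- def get_middle_four(mid_point_list, index_list):
--     # Build ONE lane list with an insertion pointer: indexes of left-of-center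
--     # mid points are inserted at the boundary, right-of-center ones appended.
--     # The answer is then a single 4-wide window of that list clamped around
--     # the boundary position.
--     lanes = []
--     boundary = 0
--     for m, idx in zip(mid_point_list, index_list):
--         if m < IMAGE_CENTER_X:
--             lanes.insert(boundary, idx)
--             boundary += 1
--         elif m > IMAGE_CENTER_X:
--             lanes.append(idx)
--     start = max(0, min(boundary - 2, len(lanes) - 4))
--     return lanes[start:start + 4]
-- ===== Notes on version B (the rewrite author's own statement) =====
-- stated objective: alternative
-- what changed: Replaces A's two partition lists and five-way branch chain by building ONE lane list with an insertion pointer (left indexes inserted at the boundary, right indexes appended) and returning a single clamped 4-wide window slice around the boundary position.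
-- outside the precondition, e.g. on get_middle_four([640], []): A returns [], B returns []
import Mathlib
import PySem

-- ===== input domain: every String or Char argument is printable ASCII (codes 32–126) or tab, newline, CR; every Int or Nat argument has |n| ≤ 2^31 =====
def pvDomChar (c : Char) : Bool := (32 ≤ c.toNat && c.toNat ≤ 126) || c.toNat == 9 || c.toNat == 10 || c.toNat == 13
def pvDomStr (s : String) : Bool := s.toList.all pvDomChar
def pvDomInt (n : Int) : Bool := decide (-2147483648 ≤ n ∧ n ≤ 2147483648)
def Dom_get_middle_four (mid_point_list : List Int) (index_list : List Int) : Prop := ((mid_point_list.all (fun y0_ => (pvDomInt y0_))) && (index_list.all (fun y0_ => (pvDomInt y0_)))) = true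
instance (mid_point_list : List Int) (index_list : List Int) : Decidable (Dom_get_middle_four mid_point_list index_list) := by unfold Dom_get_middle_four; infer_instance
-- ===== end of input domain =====

-- B builds ONE lane list with an insertion pointer (left indexes inserted at the boundary,
-- right indexes appended) and returns a single clamped 4-wide window slice around the
-- boundary, instead of A's two partition lists and five-way branch chain (objective: alternative).


-- ===== PORT A =====
def get_middle_four (mid_point_list : List Int) (index_list : List Int) : List Int :=
  let lp := (List.range mid_point_list.length).foldl
    (fun (acc : List Int × List Int) i =>
      if mid_point_list.getD i 0 < 640 then
        (acc.1 ++ [mid_point_list.getD i 0], acc.2 ++ [index_list.getD i 0])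
      else acc) ([], [])
  let rp := (List.range mid_point_list.length).foldl
    (fun (acc : List Int × List Int) i =>
      if mid_point_list.getD i 0 > 640 then
        (acc.1 ++ [mid_point_list.getD i 0], acc.2 ++ [index_list.getD i 0])
      else acc) ([], [])
  if lp.1.length = 0 then PySem.List.slice rp.2 none (some 4)
  else if rp.1.length = 0 then PySem.List.slice lp.2 (some (-4)) none
  else if lp.1.length = 1 then lp.2 ++ PySem.List.slice rp.2 none (some 3)
  else if rp.1.length = 1 then PySem.List.slice lp.2 (some (-3)) none ++ rp.2
  else PySem.List.slice lp.2 (some (-2)) none ++ PySem.List.slice rp.2 none (some 2)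

-- ===== PORT B =====
def get_middle_four_alt (mid_point_list : List Int) (index_list : List Int) : List Int :=
  let st := (mid_point_list.zip index_list).foldl
    (fun (acc : List Int × Int) p =>
      if p.1 < 640 then (PySem.List.insert acc.1 acc.2 p.2, acc.2 + 1)
      else if p.1 > 640 then (acc.1 ++ [p.2], acc.2)
      else acc) ([], 0)
  let start := max 0 (min (st.2 - 2) ((st.1.length : Int) - 4))
  PySem.List.slice st.1 (some start) (some (start + 4))

-- ===== PRECONDITION & SPEC =====
-- Pre_ requires index_list at least as long as mid_point_list: on a shorter index_list A raises
-- IndexError at the first out-of-range position whose mid point differs from 640 (only degenerate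
-- all-640 tails still return, and there both programs return the same value).
def Pre_get_middle_four (mid_point_list : List Int) (index_list : List Int) : Prop :=
  mid_point_list.length ≤ index_list.length
instance (mid_point_list : List Int) (index_list : List Int) : Decidable (Pre_get_middle_four mid_point_list index_list) := by unfold Pre_get_middle_four; infer_instance

def pvWitness_get_middle_four : List Int × List Int := ([0, 1000], [5, 7])

def Spec_get_middle_four (mid_point_list : List Int) (index_list : List Int) (out : List Int) : Prop := out = get_middle_four_alt mid_point_list index_list
instance (mid_point_list : List Int) (index_list : List Int) (out : List Int) : Decidable (Spec_get_middle_four mid_point_list index_list out) := by unfold Spec_get_middle_four; infer_instance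

-- ===== CLAIM (what is proved, stated in full; the proofs are below) =====
def Claim_equal_get_middle_four : Prop := ∀ (mid_point_list : List Int) (index_list : List Int), Dom_get_middle_four mid_point_list index_list → Pre_get_middle_four mid_point_list index_list → Spec_get_middle_four mid_point_list index_list (get_middle_four mid_point_list index_list)

-- ===== LEMMAS AND PROOFS =====

-- A's range-indexed selection loop, in closed form over the zipped lists.
lemma pvFoldA (P : Int → Prop) [DecidablePred P] :
    ∀ (mids idxs aM aI : List Int), mids.length ≤ idxs.length →
    (List.range mids.length).foldl
      (fun (acc : List Int × List Int) i =>
        if P (mids.getD i 0) then (acc.1 ++ [mids.getD i 0], acc.2 ++ [idxs.getD i 0]) else acc)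
      (aM, aI)
    = (aM ++ (mids.zip idxs).filterMap (fun p => if P p.1 then some p.1 else none),
       aI ++ (mids.zip idxs).filterMap (fun p => if P p.1 then some p.2 else none)) := by
  intro mids
  induction mids with
  | nil => intro idxs aM aI _; simp
  | cons m ms ih =>
    intro idxs aM aI h
    cases idxs with
    | nil => simp at h
    | cons x xs =>
      rw [List.length_cons, List.range_succ_eq_map, List.foldl_cons, List.foldl_map]
      simp only [List.getD_cons_succ, List.getD_cons_zero]
      by_cases hp : P m
      · rw [if_pos hp, ih xs (aM ++ [m]) (aI ++ [x]) (by simpa using h)]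
        simp [hp, List.append_assoc]
      · rw [if_neg hp, ih xs aM aI (by simpa using h)]
        simp [hp]

-- the selected mid points and selected indexes have the same count
lemma pvLenEq (P : Int → Prop) [DecidablePred P] :
    ∀ l : List (Int × Int),
    (l.filterMap (fun p => if P p.1 then some p.1 else none)).length
      = (l.filterMap (fun p => if P p.1 then some p.2 else none)).length := by
  intro l
  induction l with
  | nil => rfl
  | cons p ps ih => by_cases hp : P p.1 <;> simp [hp, ih]

-- invariant of B's single insertion-pointer pass: the state is always
-- (lefts-so-far ++ rights-so-far, number of lefts-so-far)
lemma pvFoldB :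
    ∀ (l : List (Int × Int)) (L R : List Int),
    l.foldl
      (fun (acc : List Int × Int) p =>
        if p.1 < 640 then (PySem.List.insert acc.1 acc.2 p.2, acc.2 + 1)
        else if p.1 > 640 then (acc.1 ++ [p.2], acc.2)
        else acc) (L ++ R, (L.length : Int))
    = (L ++ l.filterMap (fun p => if p.1 < 640 then some p.2 else none)
         ++ R ++ l.filterMap (fun p => if p.1 > 640 then some p.2 else none),
       (L.length : Int) + (l.filterMap (fun p => if p.1 < 640 then some p.2 else none)).length) := by
  intro l
  induction l with
  | nil => intro L R; simp
  | cons p ps ih =>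
    intro L R
    rcases lt_trichotomy p.1 640 with h | h | h
    · rw [List.foldl_cons]
      rw [if_pos h]
      rw [PySem.List.insert_natCast (L ++ R) L.length p.2 (by simp)]
      rw [List.take_left' rfl, List.drop_left' rfl]
      have e : (L ++ p.2 :: R, (L.length : Int) + 1)
           = ((L ++ [p.2]) ++ R, ((L ++ [p.2]).length : Int)) := by
        simp
      rw [e, ih (L ++ [p.2]) R]
      simp [List.append_assoc, h, show ¬(640 < p.1) from by omega]
      omega
    · simp [h, ih L R]
    · have h' : ¬ p.1 < 640 := by omega
      rw [List.foldl_cons, if_neg h', if_pos h]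
      have e : (L ++ R ++ [p.2], (L.length : Int)) = (L ++ (R ++ [p.2]), (L.length : Int)) := by
        simp
      rw [e, ih L (R ++ [p.2])]
      simp [h, h', List.append_assoc]

-- A's five-way branch chain equals B's single clamped window slice of left ++ right
lemma pvCombine (left right : List Int) :
    (if left.length = 0 then PySem.List.slice right none (some 4)
     else if right.length = 0 then PySem.List.slice left (some (-4)) none
     else if left.length = 1 then left ++ PySem.List.slice right none (some 3)
     else if right.length = 1 then PySem.List.slice left (some (-3)) none ++ right
     else PySem.List.slice left (some (-2)) none ++ PySem.List.slice right none (some 2))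
    = PySem.List.slice (left ++ right)
        (some (max 0 (min ((left.length : Int) - 2) (((left ++ right).length : Int) - 4))))
        (some (max 0 (min ((left.length : Int) - 2) (((left ++ right).length : Int) - 4)) + 4)) := by
  have hb : (left ++ right).length = left.length + right.length := List.length_append
  set s : Int := max 0 (min ((left.length : Int) - 2) (((left ++ right).length : Int) - 4)) with hs
  rw [PySem.List.slice_toNat (left ++ right) (le_max_left 0 _) (by omega)]
  have h4 : (s + 4).toNat - s.toNat = 4 := by omega
  rw [h4]
  split_ifs with h0 h1 h2 h3
  · -- no left points
    have hnil : left = [] := List.length_eq_zero_iff.mp h0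
    subst hnil
    have hst : s.toNat = 0 := by simp at hs ⊢; omega
    rw [hst]
    simp [PySem.List.slice_to right (by omega : (0:Int) ≤ 4)]
  · -- no right points
    have hnil : right = [] := List.length_eq_zero_iff.mp h1
    subst hnil
    rw [PySem.List.slice_from_neg_ofNat left 4 (by omega)]
    have hst : s.toNat = left.length - 4 := by omega
    rw [hst, List.append_nil]
    exact (List.take_of_length_le (by simp; omega)).symm
  · -- one left point
    have hst : s.toNat = 0 := by omega
    rw [hst, List.drop_zero, PySem.List.slice_to right (by omega : (0:Int) ≤ 3),
        List.take_append, List.take_of_length_le (show left.length ≤ 4 by omega), h2]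
    simp
  · -- one right point
    rw [PySem.List.slice_from_neg_ofNat left 3 (by omega)]
    have hst : s.toNat = left.length - 3 := by omega
    rw [hst, List.drop_append, Nat.sub_eq_zero_of_le (Nat.sub_le _ _), List.drop_zero]
    exact (List.take_of_length_le (by simp [h3]; omega)).symm
  · -- two on each side
    rw [PySem.List.slice_from_neg_ofNat left 2 (by omega),
        PySem.List.slice_to right (by omega : (0:Int) ≤ 2)]
    have hst : s.toNat = left.length - 2 := by omega
    have hlen : (List.drop (left.length - 2) left).length = 2 := by simp; omega
    rw [hst, List.drop_append, Nat.sub_eq_zero_of_le (Nat.sub_le _ _), List.drop_zero,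
        List.take_append, hlen,
        List.take_of_length_le (show (List.drop (left.length - 2) left).length ≤ 4 by omega)]
    simp

-- ===== VERDICT (by name: the statement is the Claim_ definition above) =====
theorem get_middle_four_spec : Claim_equal_get_middle_four := by
  intro mids idxs _ hpre
  unfold Spec_get_middle_four get_middle_four get_middle_four_alt
  rw [pvFoldA (fun m => m < 640) mids idxs [] [] hpre,
      pvFoldA (fun m => m > 640) mids idxs [] [] hpre]
  have hB := pvFoldB (mids.zip idxs) [] []
  simp only [List.nil_append, List.append_nil, List.length_nil, Nat.cast_zero, zero_add] at hB
  rw [hB]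
  simp only [List.nil_append]
  rw [pvLenEq (fun m => m < 640) (mids.zip idxs), pvLenEq (fun m => m > 640) (mids.zip idxs)]
  exact pvCombine _ _
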